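-- pv_equiv track=rewrite | github.com/viktorsimanovskiy/rag2 | app/services/ingestion/structural_qc_service.py | _compose_error_code
-- ===== SOURCE A (Python) =====
-- def _compose_error_code(
--
--     errors: list[str],
-- ) -> str:
--     """
--     Produce one deterministic top-level error code.
--
--     Priority matters: the earliest truly blocking issue should
--     become the main QC error code for the ingestion job.
--     """
--     priority = [
--         "normalized_text_empty",
--         "normalized_text_too_short",
--         "document_identity_missing",
--         "blocks_missing",
--         "blocks_count_too_low",
--         "meaningful_blocks_count_too_low",
--         "empty_block_ratio_too_high",
--         "declared_tables_not_extracted",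
--         "table_rows_present_without_tables",
--         "tables_without_rows_ratio_too_high",
--         "rows_without_table_binding_ratio_too_high",
--         "all_table_rows_empty",
--         "no_retrievable_units",
--         "block_order_duplicates_detected",
--     ]
--
--     for code in priority:
--         if code in errors:
--             return code
--
--     return errors[0] if errors else "qc_failed"
-- ===== SOURCE B (Python) =====
-- def _compose_error_code(
--     errors: list[str],
-- ) -> str:
--     """Same result as A: rank errors by a precomputed priority index and keep the best."""
--     priority = [
--         "normalized_text_empty",
--         "normalized_text_too_short",
--         "document_identity_missing",
--         "blocks_missing",
--         "blocks_count_too_low",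
--         "meaningful_blocks_count_too_low",
--         "empty_block_ratio_too_high",
--         "declared_tables_not_extracted",
--         "table_rows_present_without_tables",
--         "tables_without_rows_ratio_too_high",
--         "rows_without_table_binding_ratio_too_high",
--         "all_table_rows_empty",
--         "no_retrievable_units",
--         "block_order_duplicates_detected",
--     ]
--     rank = {code: i for i, code in enumerate(priority)}
--
--     best = None
--     for e in errors:
--         r = rank.get(e)
--         if r is not None and (best is None or r < best):
--             best = r
--
--     if best is not None:
--         return priority[best]
--     return errors[0] if errors else "qc_failed"
-- ===== Notes on version B (the rewrite author's own statement) =====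
-- stated objective: alternative
-- what changed: Instead of scanning the fixed priority list and testing each code for membership in errors, B precomputes a code->index rank dict and makes one pass over errors keeping the smallest rank, falling back to errors[0]/'qc_failed' when no ranked error exists.
import Mathlib
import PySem

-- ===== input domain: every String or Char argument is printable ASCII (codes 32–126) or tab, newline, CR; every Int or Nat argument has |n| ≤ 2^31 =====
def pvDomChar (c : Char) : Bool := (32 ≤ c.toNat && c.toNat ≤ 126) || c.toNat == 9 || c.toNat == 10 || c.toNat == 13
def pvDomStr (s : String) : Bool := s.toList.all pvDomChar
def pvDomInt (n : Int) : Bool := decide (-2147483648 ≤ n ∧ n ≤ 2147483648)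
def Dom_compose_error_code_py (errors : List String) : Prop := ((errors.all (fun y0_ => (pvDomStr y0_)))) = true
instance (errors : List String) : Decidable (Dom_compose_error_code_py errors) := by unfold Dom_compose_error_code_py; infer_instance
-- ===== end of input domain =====

-- B replaces A's scan of the fixed priority list (a membership test in `errors` per code) by one
-- pass over `errors` that keeps the smallest rank under a precomputed priority-index dict:
-- an alternative data structure / traversal order, same result.

-- ===== PORT A =====
-- the fixed priority list (shared literal; both Pythons spell out the same list)
def pvPriority : List String := [
  "normalized_text_empty",
  "normalized_text_too_short",
  "document_identity_missing",
  "blocks_missing",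
  "blocks_count_too_low",
  "meaningful_blocks_count_too_low",
  "empty_block_ratio_too_high",
  "declared_tables_not_extracted",
  "table_rows_present_without_tables",
  "tables_without_rows_ratio_too_high",
  "rows_without_table_binding_ratio_too_high",
  "all_table_rows_empty",
  "no_retrievable_units",
  "block_order_duplicates_detected"]

-- 'for code in priority: if code in errors: return code' is the first match over priority
def compose_error_code_py (errors : List String) : String :=
  match pvPriority.find? (fun code => errors.contains code) with
  | some code => code
  | none =>
    match errors with
    | [] => "qc_failed"
    | h :: _ => h

-- ===== PORT B =====
-- rank = {code: i for i, code in enumerate(priority)}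
def pvRank : PySem.Dict String Int :=
  (PySem.List.enumerate pvPriority 0).foldl (fun d ic => d.insert ic.2 ic.1) PySem.Dict.empty

-- loop body: r = rank.get(e); if r is not None and (best is None or r < best): best = r
def pvStep (best : Option Int) (e : String) : Option Int :=
  match pvRank.get? e with
  | none => best
  | some r =>
    match best with
    | none => some r
    | some b => if r < b then some r else best

def compose_error_code_py_alt (errors : List String) : String :=
  match errors.foldl pvStep none with
  | some b =>
    match PySem.List.pyGet? pvPriority b with
    | some c => c
    | none => "qc_failed"  -- unreachable totality guard: a rank is always a valid index of priority
  | none =>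
    match errors with
    | [] => "qc_failed"
    | h :: _ => h

-- ===== PRECONDITION & SPEC =====
def Spec_compose_error_code_py (errors : List String) (out : String) : Prop := out = compose_error_code_py_alt errors
instance (errors : List String) (out : String) : Decidable (Spec_compose_error_code_py errors out) := by unfold Spec_compose_error_code_py; infer_instance

-- ===== CLAIM (what is proved, stated in full; the proofs are below) =====
def Claim_equal_compose_error_code_py : Prop := ∀ (errors : List String), Dom_compose_error_code_py errors → Spec_compose_error_code_py errors (compose_error_code_py errors)

-- ===== LEMMAS AND PROOFS =====

-- option-min combine: pvStep folds an option-min of the ranks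
def pvOmin (a b : Option Int) : Option Int :=
  match a, b with
  | none, y => y
  | some x, none => some x
  | some x, some y => some (min x y)

lemma pvOmin_none (b : Option Int) : pvOmin none b = b := by cases b <;> rfl

lemma pvOmin_assoc (a b c : Option Int) : pvOmin (pvOmin a b) c = pvOmin a (pvOmin b c) := by
  cases a <;> cases b <;> cases c <;> simp [pvOmin, min_assoc]

lemma pvStep_eq_omin (s : Option Int) (e : String) : pvStep s e = pvOmin s (pvRank.get? e) := by
  unfold pvStep pvOmin
  cases pvRank.get? e with
  | none => cases s <;> rfl
  | some r =>
    cases s with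
    | none => rfl
    | some b =>
      have hmin : min b r = if r < b then r else b := by
        rw [min_def]; split_ifs <;> omega
      dsimp only
      rw [hmin]
      split_ifs <;> rfl

lemma pvOmin_min? (r : Int) (l : List Int) : pvOmin (some r) l.min? = some (l.foldl min r) := by
  cases l with
  | nil => rfl
  | cons x l' =>
    simp only [List.min?_cons', pvOmin, List.foldl_cons]
    rw [List.foldl_assoc]

lemma pvFold_eq_min? : ∀ (errors : List String) (s : Option Int),
    errors.foldl pvStep s = pvOmin s (errors.filterMap pvRank.get?).min? := by
  intro errors
  induction errors with
  | nil => intro s; cases s <;> rfl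
  | cons e rest ih =>
    intro s
    rw [List.foldl_cons, ih, pvStep_eq_omin, pvOmin_assoc]
    congr 1
    cases hr : pvRank.get? e with
    | none => simp [hr, pvOmin_none]
    | some r =>
      simp only [List.filterMap_cons, hr]
      rw [pvOmin_min?, List.min?_cons']

-- rank lookups characterised against the priority list
lemma pvIdx_sound {e : String} {r : Int} (h : pvRank.get? e = some r) :
    0 ≤ r ∧ r.toNat < pvPriority.length ∧ pvPriority[r.toNat]? = some e := by
  have hmem : (e, r) ∈ pvRank.items :=
    (PySem.Dict.get?_eq_some_iff_mem_items pvRank e r (by decide)).mp h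
  rw [show pvRank.items = (PySem.List.enumerate pvPriority 0).map (fun ic => (ic.2, ic.1)) from by decide] at hmem
  simp [PySem.List.enumerate, pvPriority, List.mem_cons, Prod.mk.injEq] at hmem
  rcases hmem with ⟨rfl, rfl⟩ | ⟨rfl, rfl⟩ | ⟨rfl, rfl⟩ | ⟨rfl, rfl⟩ | ⟨rfl, rfl⟩ | ⟨rfl, rfl⟩ | ⟨rfl, rfl⟩ | ⟨rfl, rfl⟩ | ⟨rfl, rfl⟩ | ⟨rfl, rfl⟩ | ⟨rfl, rfl⟩ | ⟨rfl, rfl⟩ | ⟨rfl, rfl⟩ | ⟨rfl, rfl⟩ <;>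
    decide

lemma pvIdx_at : ∀ k : Fin pvPriority.length, pvRank.get? pvPriority[(k : Nat)] = some ((k : Nat) : Int) := by
  decide

lemma pvIdx_of_mem : ∀ c ∈ pvPriority, (pvRank.get? c).isSome := by decide

-- ===== VERDICT (by name: the statement is the Claim_ definition above) =====
theorem compose_error_code_py_spec : Claim_equal_compose_error_code_py := by
  intro errors _
  unfold Spec_compose_error_code_py compose_error_code_py compose_error_code_py_alt
  rw [pvFold_eq_min?, pvOmin_none]
  cases hm : (errors.filterMap pvRank.get?).min? with
  | none =>
    have hnil : errors.filterMap pvRank.get? = [] := List.min?_eq_none_iff.mp hm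
    have hnone : ∀ e ∈ errors, pvRank.get? e = none := List.filterMap_eq_nil_iff.mp hnil
    have hfind : pvPriority.find? (fun code => errors.contains code) = none := by
      rw [List.find?_eq_none]
      intro c hc hcon
      have hce : c ∈ errors := List.mem_of_elem_eq_true hcon
      have := pvIdx_of_mem c hc
      rw [hnone c hce] at this
      simp at this
    rw [hfind]
  | some b =>
    obtain ⟨hbmem, hbmin⟩ := List.min?_eq_some_iff_subtype.mp hm
    obtain ⟨e, he, hidx⟩ := List.mem_filterMap.mp hbmem
    obtain ⟨hb0, hk, hget⟩ := pvIdx_sound hidx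
    have hek : pvPriority[b.toNat] = e := by
      have := List.getElem?_eq_getElem hk
      rw [hget] at this
      exact (Option.some.injEq _ _).mp this.symm
    have hpy : PySem.List.pyGet? pvPriority b = some e := by
      rw [show b = ((b.toNat : Nat) : Int) from (Int.toNat_of_nonneg hb0).symm,
        PySem.List.pyGet?_natCast]
      exact hget
    have hfind : pvPriority.find? (fun code => errors.contains code) = some e := by
      rw [List.find?_eq_some_iff_getElem]
      refine ⟨List.elem_eq_true_of_mem he, b.toNat, hk, hek, ?_⟩
      intro j hj
      by_contra hcon
      rw [Bool.not_eq_true, Bool.not_eq_false'] at hcon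
      have hje : pvPriority[j] ∈ errors := List.mem_of_elem_eq_true hcon
      have hjidx : pvRank.get? pvPriority[j] = some (j : Int) :=
        pvIdx_at ⟨j, lt_trans hj hk⟩
      have hjin : (j : Int) ∈ errors.filterMap pvRank.get? :=
        List.mem_filterMap.mpr ⟨_, hje, hjidx⟩
      have := hbmin _ hjin
      omega
    rw [hfind]
    simp [hpy]
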